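-- pv_equiv track=rewrite | github.com/azwpayne/crypt | src/crypt/encode/hex2bin.py | bin_to_hex_grouped
-- ===== SOURCE A (Python) =====
-- def bin_to_hex(bin_str: str, min_digits: int = 0) -> str:
--     """
--     基础转换：二进制字符串 → 十六进制字符串
--
--     参数:
--         bin_str: 二进制字符串(可含0b前缀或空格)
--         min_digits: 最小输出位数，不足时左侧补零
--
--     返回:
--         十六进制字符串，不含前缀和空格(大写)
--
--     示例:
--         >>> bin_to_hex("1101000111111")
--         '1A3F'
--         >>> bin_to_hex("0b1111", 2)
--         '0F'
--         >>> bin_to_hex("1101 0010")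
--         'D2'
--     """
--     # 清理输入：移除前缀、空格和换行符
--     clean_bin = bin_str.replace("0b", "").replace(" ", "").replace("\n", "").strip()
--
--     if not clean_bin:
--         raise ValueError("输入不能为空")
--
--     # 验证二进制有效性
--     if not all(c in "01" for c in clean_bin):
--         raise ValueError(f"无效的二进制字符串: {bin_str}")
--
--     # 如果长度不是4的倍数，左侧补零
--     remainder = len(clean_bin) % 4
--     if remainder != 0:
--         clean_bin = "0" * (4 - remainder) + clean_bin
--
--     # 转换并去掉 '0x' 前缀，转为大写
--     hex_str = hex(int(clean_bin, 2))[2:].upper()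
--
--     # 按最小位数补零
--     if min_digits > len(hex_str):
--         hex_str = hex_str.zfill(min_digits)
--
--     return hex_str
--
-- def bin_to_hex_grouped(bin_str: str, bytes_per_group: int = 1, separator: str = " ") -> str:
--     """
--     分组格式化输出：每N个字节用分隔符连接
--
--     参数:
--         bin_str: 二进制字符串
--         bytes_per_group: 每组字节数(默认1)
--         separator: 分隔符(默认空格)
--
--     示例:
--         >>> bin_to_hex_grouped("01001101011000010111001001101011", 1)
--         '4D 61 72 6B'
--         >>> bin_to_hex_grouped("1101011010111001", 2, ":")
--         'DB:59'
--     """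
--     hex_str = bin_to_hex(bin_str)
--
--     # 确保总长度是分组长度的倍数(每组=bytes_per_group*2个十六进制字符)
--     group_len = bytes_per_group * 2
--     remainder = len(hex_str) % group_len
--     if remainder != 0:
--         hex_str = hex_str.zfill(len(hex_str) + (group_len - remainder))
--
--     # 分组并连接
--     groups = [hex_str[j:j + group_len]
--               for j in range(0, len(hex_str), group_len)]
--
--     return separator.join(groups)
-- ===== SOURCE B (Python) =====
-- _HEX = "0123456789ABCDEF"
-- _NIB = {format(i, "04b"): _HEX[i] for i in range(16)}
--
--
-- def bin_to_hex_grouped(bin_str: str, bytes_per_group: int = 1, separator: str = " ") -> str: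
--     clean = bin_str.replace("0b", "").replace(" ", "").replace("\n", "").strip()
--
--     if not clean:
--         raise ValueError("输入不能为空")
--     if any(c not in "01" for c in clean):
--         raise ValueError(f"无效的二进制字符串: {bin_str}")
--
--     # left-pad to a whole number of nibbles, translate nibble by nibble via the table
--     clean = "0" * (-len(clean) % 4) + clean
--     digits = "".join(_NIB[clean[i:i + 4]] for i in range(0, len(clean), 4))
--     hex_str = digits.lstrip("0") or "0"
--
--     # pad to a whole number of groups and join
--     g = bytes_per_group * 2
--     hex_str = "0" * (-len(hex_str) % g) + hex_str
--     return separator.join(hex_str[j:j + g] for j in range(0, len(hex_str), g))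
-- ===== Notes on version B (the rewrite author's own statement) =====
-- stated objective: alternative
-- what changed: Replaces A's int/hex/upper arbitrary-precision round trip by a static 16-entry nibble table mapped over the binary string in 4-bit chunks, followed by a leading-zero strip with a single-zero-digit fallback for the all-zero case, and replaces the zfill-based group padding by prepending computed zeros; the cleaning chain, error behaviour and grouping join are unchanged.
import Mathlib
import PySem

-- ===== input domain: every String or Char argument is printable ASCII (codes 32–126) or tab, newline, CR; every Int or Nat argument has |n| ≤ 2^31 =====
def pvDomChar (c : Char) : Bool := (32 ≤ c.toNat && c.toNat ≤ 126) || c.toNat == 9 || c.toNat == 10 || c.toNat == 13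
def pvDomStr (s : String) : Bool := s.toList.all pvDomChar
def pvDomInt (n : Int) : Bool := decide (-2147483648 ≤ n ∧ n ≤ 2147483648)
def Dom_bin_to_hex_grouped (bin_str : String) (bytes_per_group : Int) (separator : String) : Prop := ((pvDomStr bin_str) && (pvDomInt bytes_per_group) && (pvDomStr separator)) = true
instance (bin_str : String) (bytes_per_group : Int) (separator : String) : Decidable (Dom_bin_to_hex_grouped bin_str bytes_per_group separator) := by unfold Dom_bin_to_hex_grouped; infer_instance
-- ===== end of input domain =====

-- B replaces A's int(clean,2)/hex() round trip by a 16-entry nibble table mapped over 4-bit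
-- chunks plus a leading-zero strip (objective: alternative; same observable behaviour).
-- Ports work on List Char ("string as list of code points", per the type convention's PySem.Chars view).

-- ===== PORT A =====
-- cleaning chain shared verbatim by both Pythons: .replace("0b","").replace(" ","").replace("\n","").strip()
def pvClean (bin_str : String) : List Char :=
  PySem.Chars.strip (PySem.Chars.replace (PySem.Chars.replace
    (PySem.Chars.replace bin_str.toList ['0', 'b'] []) [' '] []) ['\n'] [])

def pvAHexDigit (n : Nat) : Char := "0123456789abcdef".toList.getD n '?'

-- hex(n)[2:] for n ≥ 0: lowercase hex digits, most significant first (exact for n ≥ 0)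
def pvAHex (n : Nat) : List Char :=
  if _h : n < 16 then [pvAHexDigit n] else pvAHex (n / 16) ++ [pvAHexDigit (n % 16)]
decreasing_by exact Nat.div_lt_self (by omega) (by omega)

-- int(clean, 2): exact for nonempty strings of '0'/'1' only (no sign/space/underscore),
-- which is all the validated branch ever feeds it
def pvABinVal (cs : List Char) : Nat :=
  cs.foldl (fun a c => 2 * a + (if c = '1' then 1 else 0)) 0

-- helper bin_to_hex(bin_str, min_digits); none = ValueError (excluded by Pre_)
def pvA_bin_to_hex (bin_str : String) (min_digits : Int) : Option (List Char) :=
  let clean0 := pvClean bin_str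
  if clean0.isEmpty then none
  else if ¬ (clean0.all fun c => c = '0' || c = '1') then none
  else
    let remainder := clean0.length % 4
    let clean := if remainder ≠ 0 then List.replicate (4 - remainder) '0' ++ clean0 else clean0
    let hex_str := PySem.Chars.upper (pvAHex (pvABinVal clean))
    some (if min_digits > (hex_str.length : Int) then PySem.Chars.zfill hex_str min_digits else hex_str)

def bin_to_hex_grouped (bin_str : String) (bytes_per_group : Int) (separator : String) : String :=
  match pvA_bin_to_hex bin_str 0 with
  | none => ""          -- ValueError: excluded by Pre_
  | some hex_str =>
    let group_len : Int := bytes_per_group * 2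
    match PySem.Int.mod? (hex_str.length : Int) group_len with
    | none => ""        -- ZeroDivisionError (bytes_per_group = 0): excluded by Pre_
    | some remainder =>
      let hex2 := if remainder ≠ 0 then
          PySem.Chars.zfill hex_str ((hex_str.length : Int) + (group_len - remainder)) else hex_str
      String.ofList (PySem.Chars.join separator.toList
        ((PySem.List.pyRange 0 (hex2.length : Int) group_len).map
          (fun j => PySem.List.slice hex2 (some j) (some (j + group_len)))))

-- ===== PORT B =====
def pvBHexUpper : List Char := "0123456789ABCDEF".toList

-- _NIB = {format(i, "04b"): _HEX[i] for i in range(16)}  (format(i,'04b') = bin digits zero-padded to 4)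
def pvBNib : PySem.Dict (List Char) Char :=
  PySem.Dict.mk ((PySem.List.pyRange 0 16 1).map
    (fun i => (PySem.Chars.zfill (PySem.Int.toBinChars i) 4, PySem.List.pyGetD pvBHexUpper i '?')))

def bin_to_hex_grouped_alt (bin_str : String) (bytes_per_group : Int) (separator : String) : String :=
  let clean0 := pvClean bin_str
  if clean0.isEmpty then ""                                      -- ValueError: excluded by Pre_
  else if clean0.any (fun c => ¬ (c = '0' || c = '1')) then ""   -- ValueError: excluded by Pre_
  else
    -- clean = "0" * (-len(clean) % 4) + clean
    let clean := List.replicate (PySem.Int.mod (-(clean0.length : Int)) 4).toNat '0' ++ clean0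
    -- "".join of one-char strings = the list of those chars
    let digits := (PySem.List.pyRange 0 (clean.length : Int) 4).map
        (fun i => pvBNib.getD (PySem.List.slice clean (some i) (some (i + 4))) '?')
    -- digits.lstrip("0") or "0"  (lstrip with explicit chars: drop leading '0's; exact)
    let stripped := digits.dropWhile (fun c => c = '0')
    let hex_str := if stripped.isEmpty then ['0'] else stripped
    let g : Int := bytes_per_group * 2
    match PySem.Int.mod? (-(hex_str.length : Int)) g with
    | none => ""        -- ZeroDivisionError (bytes_per_group = 0): excluded by Pre_
    | some m =>
      let hexp := List.replicate m.toNat '0' ++ hex_str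
      String.ofList (PySem.Chars.join separator.toList
        ((PySem.List.pyRange 0 (hexp.length : Int) g).map
          (fun j => PySem.List.slice hexp (some j) (some (j + g)))))

-- ===== PRECONDITION & SPEC =====
-- Pre_ excludes exactly the raising inputs: empty/invalid cleaned binary (ValueError) and
-- bytes_per_group = 0 (ZeroDivisionError); A returns on everything else, including negatives.
def Pre_bin_to_hex_grouped (bin_str : String) (bytes_per_group : Int) (separator : String) : Prop :=
  pvClean bin_str ≠ [] ∧ ((pvClean bin_str).all (fun c => c = '0' || c = '1')) = true ∧ bytes_per_group ≠ 0
instance (bin_str : String) (bytes_per_group : Int) (separator : String) : Decidable (Pre_bin_to_hex_grouped bin_str bytes_per_group separator) := by unfold Pre_bin_to_hex_grouped; infer_instance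

def pvWitness_bin_to_hex_grouped : String × Int × String := ("10", 1, " ")

def Spec_bin_to_hex_grouped (bin_str : String) (bytes_per_group : Int) (separator : String) (out : String) : Prop := out = bin_to_hex_grouped_alt bin_str bytes_per_group separator
instance (bin_str : String) (bytes_per_group : Int) (separator : String) (out : String) : Decidable (Spec_bin_to_hex_grouped bin_str bytes_per_group separator out) := by unfold Spec_bin_to_hex_grouped; infer_instance

-- ===== CLAIM (what is proved, stated in full; the proofs are below) =====
def Claim_equal_bin_to_hex_grouped : Prop := ∀ (bin_str : String) (bytes_per_group : Int) (separator : String), Dom_bin_to_hex_grouped bin_str bytes_per_group separator → Pre_bin_to_hex_grouped bin_str bytes_per_group separator → Spec_bin_to_hex_grouped bin_str bytes_per_group separator (bin_to_hex_grouped bin_str bytes_per_group separator)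

-- ===== LEMMAS AND PROOFS =====

-- uppercase hex digit of a nibble value
def pvDig (n : Nat) : Char := PySem.Chars.upperChar (pvAHexDigit n)
-- canonical uppercase hex digits of n (empty for 0)
def pvH (n : Nat) : List Char := if n = 0 then [] else PySem.Chars.upper (pvAHex n)
-- n rendered into m hex digits, zero-padded on the left
def pvPad (m n : Nat) : List Char := List.replicate (m - (pvH n).length) '0' ++ pvH n

theorem pvU_lt (n : Nat) (h : n < 16) : PySem.Chars.upper (pvAHex n) = [pvDig n] := by
  rw [pvAHex]; simp [h, PySem.Chars.upper, pvDig]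

theorem pvU_ge (n : Nat) (h : ¬ n < 16) :
    PySem.Chars.upper (pvAHex n) = PySem.Chars.upper (pvAHex (n / 16)) ++ [pvDig (n % 16)] := by
  conv_lhs => rw [pvAHex]
  simp [h, PySem.Chars.upper, pvDig]

theorem pvPad_succ (m n : Nat) : pvPad (m + 1) n = pvPad m (n / 16) ++ [pvDig (n % 16)] := by
  by_cases h0 : n = 0
  · subst h0
    have h : pvDig 0 = '0' := by decide
    simp [pvPad, pvH, h, List.replicate_succ' (n := m) (a := '0')]
  by_cases h16 : n < 16
  · have hd : n / 16 = 0 := Nat.div_eq_of_lt h16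
    have hm : n % 16 = n := Nat.mod_eq_of_lt h16
    simp [pvPad, pvH, h0, hd, hm, pvU_lt n h16]
  · have hd0 : n / 16 ≠ 0 := by
      intro h; have := Nat.div_eq_of_lt (by omega : n < 16); omega
    simp [pvPad, pvH, h0, hd0, pvU_ge n h16]

theorem pvH_len_le (m n : Nat) (h : n < 16 ^ m) : (pvH n).length ≤ m := by
  induction m generalizing n with
  | zero => interval_cases n; simp [pvH]
  | succ m ih =>
    by_cases h0 : n = 0
    · simp [pvH, h0]
    by_cases h16 : n < 16
    · simp [pvH, h0, pvU_lt n h16]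
    · have hlt : n / 16 < 16 ^ m := by
        rw [Nat.div_lt_iff_lt_mul (by norm_num)]
        calc n < 16 ^ (m+1) := h
        _ = 16 ^ m * 16 := by ring
      have := ih (n / 16) hlt
      have hd0 : n / 16 ≠ 0 := by
        intro hq; have := Nat.div_eq_of_lt (by omega : n < 16); omega
      simp [pvH, h0, pvU_ge n h16]
      simpa [pvH, hd0] using this

theorem pvH_split (m v r : Nat) (hv0 : 0 < v) (hv : v < 16) (hr : r < 16 ^ m) :
    pvH (v * 16 ^ m + r) = pvDig v :: pvPad m r := by
  induction m generalizing r with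
  | zero =>
    interval_cases r
    have hv' : ¬ v = 0 := by omega
    simp [pvH, pvPad, pvU_lt v hv, hv']
  | succ m ih =>
    have h16m : (0:Nat) < 16 ^ m := by positivity
    set n := v * 16 ^ (m+1) + r with hn
    have hge : ¬ n < 16 := by
      have : 16 ^ (m+1) ≥ 16 := by
        calc (16:Nat) = 16 ^ 1 := by norm_num
        _ ≤ 16 ^ (m+1) := Nat.pow_le_pow_right (by norm_num) (by omega)
      nlinarith
    have hn16 : n = r + v * 16 ^ m * 16 := by rw [hn, pow_succ]; ring
    have hdiv : n / 16 = v * 16 ^ m + r / 16 := by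
      rw [hn16, Nat.add_mul_div_right _ _ (by norm_num : (0:Nat) < 16)]; omega
    have hmod : n % 16 = r % 16 := by rw [hn16, Nat.add_mul_mod_self_right]
    have hr' : r / 16 < 16 ^ m := by
      rw [Nat.div_lt_iff_lt_mul (by norm_num)]
      calc r < 16 ^ (m+1) := hr
      _ = 16 ^ m * 16 := by ring
    have hne : n ≠ 0 := by positivity
    rw [pvH, if_neg hne, pvU_ge n hge, hdiv, hmod]
    have := ih (r / 16) hr'
    rw [pvH, if_neg (by positivity : v * 16 ^ m + r / 16 ≠ 0)] at this
    rw [this, pvPad_succ]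
    simp

theorem pvBinVal_foldl (ys : List Char) (a : Nat) :
    ys.foldl (fun a c => 2 * a + (if c = '1' then 1 else 0)) a = a * 2 ^ ys.length + pvABinVal ys := by
  induction ys generalizing a with
  | nil => simp [pvABinVal]
  | cons y ys ih =>
    simp only [List.foldl_cons, List.length_cons, pvABinVal]
    rw [ih, ih (2 * 0 + _)]
    ring

theorem pvBinVal_append (xs ys : List Char) :
    pvABinVal (xs ++ ys) = pvABinVal xs * 2 ^ ys.length + pvABinVal ys := by
  simp only [pvABinVal, List.foldl_append]
  rw [pvBinVal_foldl]
  rfl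

theorem pvBinVal_lt (cs : List Char) : pvABinVal cs < 2 ^ cs.length := by
  induction cs with
  | nil => simp [pvABinVal]
  | cons c cs ih =>
    have h2 : pvABinVal (c :: cs) = (if c = '1' then 1 else 0) * 2 ^ cs.length + pvABinVal cs := by
      simp only [pvABinVal, List.foldl_cons]
      simpa using pvBinVal_foldl cs (2 * 0 + if c = '1' then 1 else 0)
    rw [h2]
    by_cases h : c = '1' <;> simp [h, List.length_cons, pow_succ] <;> omega

theorem pvNib_getD (a b c d : Char) (ha : a = '0' ∨ a = '1') (hb : b = '0' ∨ b = '1')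
    (hc : c = '0' ∨ c = '1') (hd : d = '0' ∨ d = '1') :
    pvBNib.getD [a, b, c, d] '?' = pvDig (pvABinVal [a, b, c, d]) := by
  rcases ha with rfl | rfl <;> rcases hb with rfl | rfl <;> rcases hc with rfl | rfl <;>
    rcases hd with rfl | rfl <;> decide

theorem pvChunks_eq (m : Nat) (cs : List Char) (hbits : ∀ c ∈ cs, c = '0' ∨ c = '1')
    (hl : cs.length = 4 * m) :
    (PySem.List.pyRange 0 (cs.length : Int) 4).map
        (fun i => pvBNib.getD (PySem.List.slice cs (some i) (some (i + 4))) '?')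
      = List.replicate (m - (pvH (pvABinVal cs)).length) '0' ++ pvH (pvABinVal cs) := by
  induction m generalizing cs with
  | zero =>
    have : cs = [] := List.eq_nil_of_length_eq_zero (by omega)
    subst this
    simp [PySem.List.pyRange_of_pos 0 0 (by norm_num : (0:Int) < 4), pvABinVal, pvH]
  | succ m ih =>
    rcases cs with _ | ⟨a, cs⟩; · simp at hl
    rcases cs with _ | ⟨b, cs⟩; · simp at hl; omega
    rcases cs with _ | ⟨c, cs⟩; · simp at hl; omega
    rcases cs with _ | ⟨d, rest⟩; · simp at hl; omega
    have hlr : rest.length = 4 * m := by simp at hl; omega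
    set cs4 : List Char := a :: b :: c :: d :: rest with hcs4
    have hL : (cs4.length : Int) = 4 * (m : Int) + 4 := by simp [hcs4, hlr]; ring
    -- unfold both pyRanges to List.range maps
    rw [PySem.List.pyRange_of_pos 0 (cs4.length : Int) (by norm_num : (0:Int) < 4)]
    have hcount : (if (0:Int) < (cs4.length : Int) then
        (((cs4.length : Int) - 0 + 4 - 1) / 4).toNat else 0) = m + 1 := by
      rw [hL, if_pos (by omega : (0:Int) < 4 * (m:Int) + 4)]; omega
    rw [hcount, List.range_succ_eq_map, List.map_cons, List.map_cons, List.map_map]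
    -- head chunk
    have hhead : PySem.List.slice cs4 (some (0 + 4 * ((0:Nat) : Int)))
        (some ((0 + 4 * ((0:Nat) : Int)) + 4)) = [a, b, c, d] := by
      norm_num
      have := PySem.List.slice_natCast_add cs4 0 4
      simpa using this
    -- tail chunks equal the chunks of rest
    have htail : (List.range m).map (((fun i => pvBNib.getD (PySem.List.slice cs4 (some i) (some (i + 4))) '?') ∘
          (fun k : Nat => (0:Int) + 4 * (k : Int))) ∘ Nat.succ)
        = (PySem.List.pyRange 0 (rest.length : Int) 4).map
            (fun i => pvBNib.getD (PySem.List.slice rest (some i) (some (i + 4))) '?') := by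
      rw [PySem.List.pyRange_of_pos 0 (rest.length : Int) (by norm_num : (0:Int) < 4)]
      have hLr : (rest.length : Int) = 4 * (m : Int) := by rw [hlr]; push_cast; ring
      have hcount2 : (if (0:Int) < (rest.length : Int) then
          (((rest.length : Int) - 0 + 4 - 1) / 4).toNat else 0) = m := by
        rcases Nat.eq_zero_or_pos m with hm | hm
        · subst hm; rw [if_neg (by omega)]
        · rw [hLr, if_pos (by omega : (0:Int) < 4 * (m:Int))]; omega
      rw [hcount2, List.map_map]
      apply List.map_congr_left
      intro k hk
      simp only [Function.comp]
      -- slice cs4 (4(k+1), 4(k+1)+4) = slice rest (4k, 4k+4)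
      have e1 : ((0:Int) + 4 * ((Nat.succ k : Nat) : Int)) = ((4 * k + 4 : Nat) : Int) := by push_cast; ring
      have e2 : ((0:Int) + 4 * ((k : Nat) : Int)) = ((4 * k : Nat) : Int) := by push_cast; ring
      have g1 : ((4 * k + 4 : Nat) : Int) + 4 = ((4 * k + 4 : Nat) : Int) + ((4 : Nat) : Int) := by norm_num
      have g2 : ((4 * k : Nat) : Int) + 4 = ((4 * k : Nat) : Int) + ((4 : Nat) : Int) := by norm_num
      have hdrop : List.drop (4 * k + 4) cs4 = List.drop (4 * k) rest := by
        rw [hcs4, show 4 * k + 4 = 4 * k + 3 + 1 from rfl, List.drop_succ_cons,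
          show 4 * k + 3 = 4 * k + 2 + 1 from rfl, List.drop_succ_cons,
          show 4 * k + 2 = 4 * k + 1 + 1 from rfl, List.drop_succ_cons, List.drop_succ_cons]
      rw [e1, e2, g1, g2, PySem.List.slice_natCast_add, PySem.List.slice_natCast_add, hdrop]
    rw [List.map_map]
    rw [htail, ih rest (fun c hc => hbits c (by simp [hcs4, hc])) hlr, hhead,
      pvNib_getD a b c d (hbits a (by simp [hcs4])) (hbits b (by simp [hcs4]))
        (hbits c (by simp [hcs4])) (hbits d (by simp [hcs4]))]
    -- value bookkeeping
    have hsplit : pvABinVal cs4 = pvABinVal [a,b,c,d] * 16 ^ m + pvABinVal rest := by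
      have := pvBinVal_append [a,b,c,d] rest
      rw [hlr] at this
      rw [show cs4 = [a,b,c,d] ++ rest from rfl, this,
        show (2:Nat) ^ (4 * m) = 16 ^ m by rw [show (16:Nat) = 2 ^ 4 from rfl, ← pow_mul]]
    have hv16 : pvABinVal [a,b,c,d] < 16 := by simpa using pvBinVal_lt [a,b,c,d]
    have hrlt : pvABinVal rest < 16 ^ m := by
      have := pvBinVal_lt rest
      rw [hlr, show (2:Nat) ^ (4 * m) = 16 ^ m by rw [show (16:Nat) = 2 ^ 4 from rfl, ← pow_mul]] at this
      exact this
    set v := pvABinVal [a,b,c,d] with hv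
    set r := pvABinVal rest with hr
    rcases Nat.eq_zero_or_pos v with hv0 | hv0
    · -- leading zero nibble
      have hn : pvABinVal cs4 = r := by rw [hsplit, hv0]; ring
      rw [hn]
      have hlen : (pvH r).length ≤ m := pvH_len_le m r hrlt
      have : m + 1 - (pvH r).length = (m - (pvH r).length) + 1 := by omega
      rw [this, List.replicate_succ]
      have : pvDig v = '0' := by rw [hv0]; decide
      rw [this]
      simp
    · -- nonzero nibble: the canonical digits take all m+1 positions
      have hn : pvH (pvABinVal cs4) = pvDig v :: pvPad m r := by
        rw [hsplit]; exact pvH_split m v r hv0 hv16 hrlt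
      rw [hn]
      have hlen : (pvH r).length ≤ m := pvH_len_le m r hrlt
      have hplen : (pvPad m r).length = m := by simp [pvPad]; omega
      have : m + 1 - (pvDig v :: pvPad m r).length = 0 := by simp [hplen]
      rw [this]
      simp [pvPad]

theorem pvH_head (n : Nat) (h : 0 < n) : ∃ c t, pvH n = c :: t ∧ c ≠ '0' := by
  induction n using Nat.strong_induction_on with
  | _ n ih =>
    by_cases h16 : n < 16
    · have hne : ¬ n = 0 := by omega
      refine ⟨pvDig n, [], ?_, ?_⟩
      · simp [pvH, hne, pvU_lt n h16]
      · have : ∀ k ∈ List.range 16, k ≠ 0 → pvDig k ≠ '0' := by decide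
        exact this n (List.mem_range.mpr h16) hne
    · have hd0 : 0 < n / 16 := by
        rcases Nat.lt_or_ge n 16 with hlt | hge
        · omega
        · exact Nat.div_pos hge (by norm_num)
      obtain ⟨c, t, hct, hc0⟩ := ih (n / 16) (Nat.div_lt_self (by omega) (by norm_num)) hd0
      refine ⟨c, t ++ [pvDig (n % 16)], ?_, hc0⟩
      rw [pvH, if_neg (by omega), pvU_ge n h16]
      rw [pvH, if_neg (by omega)] at hct
      rw [hct]
      simp

theorem pvU_mem (n : Nat) : ∀ c ∈ PySem.Chars.upper (pvAHex n), c ∈ pvBHexUpper := by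
  induction n using Nat.strong_induction_on with
  | _ n ih =>
    by_cases h16 : n < 16
    · rw [pvU_lt n h16]
      have : ∀ k ∈ List.range 16, pvDig k ∈ pvBHexUpper := by decide
      intro c hcm
      simp at hcm
      subst hcm
      exact this n (List.mem_range.mpr h16)
    · rw [pvU_ge n h16]
      intro c hcm
      rcases List.mem_append.mp hcm with hm | hm
      · exact ih (n / 16) (Nat.div_lt_self (by omega) (by omega)) c hm
      · have : ∀ k ∈ List.range 16, pvDig k ∈ pvBHexUpper := by decide
        simp at hm
        subst hm
        exact this (n % 16) (List.mem_range.mpr (Nat.mod_lt _ (by omega)))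

theorem pvGroup_eq (h : List Char) (g : Int) (hg : g ≠ 0) (hne : h ≠ [])
    (hhd : ∀ c, h.head? = some c → c ≠ '+' ∧ c ≠ '-') :
    (if PySem.Int.mod (h.length : Int) g ≠ 0 then
        PySem.Chars.zfill h ((h.length : Int) + (g - PySem.Int.mod (h.length : Int) g)) else h)
      = List.replicate (PySem.Int.mod (-(h.length : Int)) g).toNat '0' ++ h := by
  rcases Int.lt_or_lt_of_ne hg with hneg | hpos
  · -- g < 0 : both sides are h
    have h1 := PySem.Int.mod_neg_bounds (h.length : Int) hneg
    have h2 := PySem.Int.mod_neg_bounds (-(h.length : Int)) hneg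
    have ht : (PySem.Int.mod (-(h.length : Int)) g).toNat = 0 := by omega
    rw [ht, List.replicate_zero, List.nil_append]
    by_cases hz : PySem.Int.mod (h.length : Int) g = 0
    · simp [hz]
    · rw [if_pos hz]
      -- width ≤ length, so zfill is the identity
      have hw : (h.length : Int) + (g - PySem.Int.mod (h.length : Int) g) ≤ (h.length : Int) := by
        omega
      simp only [PySem.Chars.zfill, if_pos hw]
  · -- g > 0
    have hme := PySem.Int.mod_eq_emod_of_pos (a := (h.length : Int)) hpos
    have hme2 := PySem.Int.mod_eq_emod_of_pos (a := -(h.length : Int)) hpos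
    rw [hme, hme2]
    by_cases hz : (h.length : Int) % g = 0
    · have hdvd : g ∣ (h.length : Int) := Int.dvd_of_emod_eq_zero hz
      have : (-(h.length : Int)) % g = 0 := by rw [Int.neg_emod, if_pos hdvd]
      simp [hz, this]
    · rw [if_pos hz]
      have hr1 : 0 < (h.length : Int) % g := by
        have := Int.emod_nonneg (h.length : Int) (by omega : g ≠ 0)
        omega
      have hrg : (h.length : Int) % g < g := Int.emod_lt_of_pos _ hpos
      have hw : ¬ ((h.length : Int) + (g - (h.length : Int) % g) ≤ (h.length : Int)) := by omega
      rcases h with _ | ⟨c, rest⟩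
      · exact absurd rfl hne
      · obtain ⟨hcp, hcm⟩ := hhd c rfl
        simp only [PySem.Chars.zfill, if_neg hw]
        rw [if_neg (by simp [hcp, hcm])]
        congr 1
        have hnd : ¬ g ∣ (((c :: rest).length : Int)) := by
          intro hd
          exact hz (Int.emod_eq_zero_of_dvd hd)
        have hemod : (-(((c :: rest).length : Int))) % g = g - ((c :: rest).length : Int) % g := by
          rw [Int.neg_emod, if_neg hnd, Int.natAbs_of_nonneg (by omega)]
        rw [hemod]
        congr 1
        omega

theorem pvHexUpper_no_sign : ∀ x ∈ pvBHexUpper, x ≠ '+' ∧ x ≠ '-' := by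
  intro x hx
  constructor <;> (intro h; subst h; revert hx; decide)

theorem pvDropWhile_rep (k : Nat) (c : Char) (t : List Char) (hc : ¬ c = '0') :
    List.dropWhile (fun x => x = '0') (List.replicate k '0' ++ (c :: t)) = c :: t := by
  induction k with
  | zero => simp [hc]
  | succ k ih => simpa [List.replicate_succ, List.dropWhile_cons] using ih

-- ===== VERDICT (by name: the statement is the Claim_ definition above) =====
theorem bin_to_hex_grouped_spec : Claim_equal_bin_to_hex_grouped := by
  intro bin_str bytes_per_group separator _hdom hpre
  obtain ⟨hne, hball, hbpg⟩ := hpre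
  have hbits : ∀ c ∈ pvClean bin_str, c = '0' ∨ c = '1' := by
    intro c hc
    have := List.all_eq_true.mp hball c hc
    simpa using this
  unfold Spec_bin_to_hex_grouped
  set cl := pvClean bin_str with hcl
  -- the two paddings agree
  have hpadeq : (if cl.length % 4 ≠ 0 then List.replicate (4 - cl.length % 4) '0' ++ cl else cl)
      = List.replicate (PySem.Int.mod (-(cl.length : Int)) 4).toNat '0' ++ cl := by
    rw [PySem.Int.mod_eq_emod_of_pos (a := -(cl.length : Int)) (by norm_num : (0:Int) < 4)]
    by_cases h4 : cl.length % 4 = 0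
    · have : ((-(cl.length : Int)) % 4).toNat = 0 := by omega
      simp [h4, this]
    · have : ((-(cl.length : Int)) % 4).toNat = 4 - cl.length % 4 := by omega
      simp [h4, this]
  set clean := List.replicate (PySem.Int.mod (-(cl.length : Int)) 4).toNat '0' ++ cl with hclean
  have hcbits : ∀ c ∈ clean, c = '0' ∨ c = '1' := by
    intro c hc
    rcases List.mem_append.mp hc with hm | hm
    · exact Or.inl (List.eq_of_mem_replicate hm)
    · exact hbits c hm
  have hclen4 : clean.length % 4 = 0 := by
    rw [← hpadeq]
    by_cases h4 : cl.length % 4 = 0 <;> simp [h4] <;> omega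
  set n := pvABinVal clean with hn
  set m := clean.length / 4 with hm
  have hclenm : clean.length = 4 * m := by omega
  -- the two hex strings agree
  have hchunks := pvChunks_eq m clean hcbits hclenm
  have hAhex : PySem.Chars.upper (pvAHex n) = (if n = 0 then ['0'] else pvH n) := by
    by_cases h0 : n = 0
    · rw [h0, if_pos rfl, pvU_lt 0 (by norm_num)]; decide
    · rw [if_neg h0, pvH, if_neg h0]
  have hBhex : (let stripped := (((PySem.List.pyRange 0 (clean.length : Int) 4).map
        (fun i => pvBNib.getD (PySem.List.slice clean (some i) (some (i + 4))) '?')).dropWhile (fun c => c = '0'));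
      if stripped.isEmpty then ['0'] else stripped) = (if n = 0 then ['0'] else pvH n) := by
    rw [hchunks, ← hn]
    by_cases h0 : n = 0
    · rw [if_pos h0, h0]
      have h1 : pvH 0 = [] := by simp [pvH]
      simp [h1]
    · obtain ⟨c, t, hct, hc0⟩ := pvH_head n (by omega)
      rw [hct, if_neg h0, pvDropWhile_rep _ c t hc0]
      simp
  -- name the common hex string and its facts
  set hstr := (if n = 0 then ['0'] else pvH n) with hhstr
  have hsne : hstr ≠ [] := by
    by_cases h0 : n = 0
    · simp [hhstr, h0]
    · obtain ⟨c, t, hct, _⟩ := pvH_head n (by omega)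
      simp [hhstr, h0, hct]
  have hshd : ∀ c, hstr.head? = some c → c ≠ '+' ∧ c ≠ '-' := by
    intro c hc
    have hmem : c ∈ pvBHexUpper := by
      by_cases h0 : n = 0
      · simp [hhstr, h0] at hc
        subst hc; decide
      · obtain ⟨c', t, hct, _⟩ := pvH_head n (by omega)
        rw [hhstr, if_neg h0, hct] at hc
        simp at hc
        subst hc
        have : c' ∈ PySem.Chars.upper (pvAHex n) := by
          have : pvH n = PySem.Chars.upper (pvAHex n) := by rw [pvH, if_neg h0]
          rw [← this, hct]; simp
        exact pvU_mem n c' this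
    exact pvHexUpper_no_sign c hmem
  have hg2 : bytes_per_group * 2 ≠ 0 := by
    intro h; exact hbpg (by omega)
  -- now unfold both ports
  show bin_to_hex_grouped bin_str bytes_per_group separator = _
  rw [bin_to_hex_grouped, bin_to_hex_grouped_alt, pvA_bin_to_hex]
  have hclE : cl.isEmpty = false := by
    rcases cl with _ | _
    · exact absurd rfl hne
    · rfl
  have hallb : (cl.all fun c => c = '0' || c = '1') = true := by
    rw [List.all_eq_true]
    intro c hc
    rcases hbits c hc with h | h <;> simp [h]
  have hanyb : (cl.any fun c => ¬ (c = '0' || c = '1')) = false := by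
    rw [List.any_eq_false]
    intro c hc
    rcases hbits c hc with h | h <;> simp [h]
  simp only [← hcl, hclE, Bool.false_eq_true, if_false, hallb, not_true, hanyb]
  simp only [if_neg (show ¬ (0:Int) > ((PySem.Chars.upper (pvAHex (pvABinVal (if cl.length % 4 ≠ 0 then List.replicate (4 - cl.length % 4) '0' ++ cl else cl)))).length : Int) by omega)]
  rw [hpadeq, ← hclean, ← hn, hAhex]
  rw [show (if ((((PySem.List.pyRange 0 ((clean.length:Nat) : Int) 4).map
        (fun i => pvBNib.getD (PySem.List.slice clean (some i) (some (i + 4))) '?')).dropWhile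
          (fun c => c = '0')).isEmpty = true) then (['0'] : List Char)
      else (((PySem.List.pyRange 0 ((clean.length:Nat) : Int) 4).map
        (fun i => pvBNib.getD (PySem.List.slice clean (some i) (some (i + 4))) '?')).dropWhile
          (fun c => c = '0'))) = hstr from hBhex]
  simp only [PySem.Int.mod?, if_neg hg2]
  have hfm : ∀ a b : Int, Int.fmod a b = PySem.Int.mod a b := fun _ _ => rfl
  simp only [hfm]
  rw [pvGroup_eq hstr (bytes_per_group * 2) hg2 hsne hshd]
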